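-- pv_equiv track=rewrite | github.com/najicham/nba-stats-scraper | monitoring/health_summary/main.py | determine_overall_quality
-- ===== SOURCE A (Python) =====
-- from typing import Dict, List, Optional
--
-- def determine_overall_quality(phases: Dict) -> str:
--     """
--     Determine overall data quality based on phase statuses.
--
--     Args:
--         phases: Dictionary of phase statuses
--
--     Returns:
--         Quality level: GOLD, SILVER, BRONZE, or UNKNOWN
--     """
--     all_success = all(p['status'] == 'success' for p in phases.values())
--     any_failed = any(p['status'] == 'failed' for p in phases.values())
--     any_partial = any(p['status'] == 'partial' for p in phases.values())
--
--     if all_success: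
--         return 'GOLD'
--     elif any_failed:
--         return 'BRONZE'
--     elif any_partial:
--         return 'SILVER'
--     else:
--         return 'UNKNOWN'
-- ===== SOURCE B (Python) =====
-- def determine_overall_quality(phases):
--     """Single fold: map each status to a severity rank, keep the worst, look up the tier."""
--     rank = {'success': 0, 'partial': 2, 'failed': 3}
--     worst = 0
--     for p in phases.values():
--         worst = max(worst, rank.get(p['status'], 1))
--     return ('GOLD', 'UNKNOWN', 'SILVER', 'BRONZE')[worst]
-- ===== Notes on version B (the rewrite author's own statement) =====
-- stated objective: simpler
-- what changed: Replaces A's three staged all/any boolean scans and branch chain by a single fold that maps each status to a numeric severity rank, accumulates the maximum rank, and indexes a tier table with it.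
import Mathlib
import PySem

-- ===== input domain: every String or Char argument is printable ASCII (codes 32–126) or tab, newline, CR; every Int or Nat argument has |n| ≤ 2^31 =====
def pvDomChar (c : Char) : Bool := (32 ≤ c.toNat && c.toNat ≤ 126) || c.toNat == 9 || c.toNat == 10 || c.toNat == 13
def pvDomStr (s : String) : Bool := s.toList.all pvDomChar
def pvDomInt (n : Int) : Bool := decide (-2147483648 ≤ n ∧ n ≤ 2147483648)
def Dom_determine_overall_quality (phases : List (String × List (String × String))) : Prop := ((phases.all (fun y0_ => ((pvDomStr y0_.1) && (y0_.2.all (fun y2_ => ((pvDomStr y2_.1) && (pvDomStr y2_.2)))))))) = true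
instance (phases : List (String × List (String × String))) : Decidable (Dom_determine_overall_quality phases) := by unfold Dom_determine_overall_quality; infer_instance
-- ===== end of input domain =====

-- B replaces A's three staged all/any scans by a single fold that maps each status to a
-- numeric severity rank, keeps the worst rank seen, and looks the tier up in a table
-- (objective: simpler).


-- ===== PORT A =====
-- p['status'] is ported as Dict.getD … "status" ""; under Pre_ the key is present, so the
-- default is never used (a missing key is a KeyError in Python, excluded by Pre_).
def determine_overall_quality (phases : List (String × List (String × String))) : String :=
  let all_success := phases.all (fun p => PySem.Dict.getD (PySem.Dict.mk p.2) "status" "" == "success")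
  let any_failed  := phases.any (fun p => PySem.Dict.getD (PySem.Dict.mk p.2) "status" "" == "failed")
  let any_partial := phases.any (fun p => PySem.Dict.getD (PySem.Dict.mk p.2) "status" "" == "partial")
  if all_success then "GOLD"
  else if any_failed then "BRONZE"
  else if any_partial then "SILVER"
  else "UNKNOWN"

-- ===== PORT B =====
-- rank.get(p['status'], 1)
def pvRank (s : String) : Nat :=
  PySem.Dict.getD (PySem.Dict.mk [("success", 0), ("partial", 2), ("failed", 3)]) s 1

def determine_overall_quality_alt (phases : List (String × List (String × String))) : String :=
  let worst := phases.foldl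
    (fun worst p => max worst (pvRank (PySem.Dict.getD (PySem.Dict.mk p.2) "status" ""))) 0
  -- ('GOLD', 'UNKNOWN', 'SILVER', 'BRONZE')[worst]; worst ≤ 3 always, so the index is in range
  ["GOLD", "UNKNOWN", "SILVER", "BRONZE"].getD worst ""

-- ===== PRECONDITION & SPEC =====
-- Pre_ excludes inputs where some phase lacks a 'status' key: there A usually raises KeyError
-- (and B always does); on the few such inputs where A's short-circuiting any/all happens to
-- return before reaching the bad phase, A's value is an artefact and B raises.
def Pre_determine_overall_quality (phases : List (String × List (String × String))) : Prop :=
  phases.all (fun p => (PySem.Dict.get? (PySem.Dict.mk p.2) "status").isSome) = true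
instance (phases : List (String × List (String × String))) : Decidable (Pre_determine_overall_quality phases) := by unfold Pre_determine_overall_quality; infer_instance
def pvWitness_determine_overall_quality : (List (String × List (String × String))) :=
  [("a", [("status", "success")]), ("b", [("status", "failed")])]

def Spec_determine_overall_quality (phases : List (String × List (String × String))) (out : String) : Prop := out = determine_overall_quality_alt phases
instance (phases : List (String × List (String × String))) (out : String) : Decidable (Spec_determine_overall_quality phases out) := by unfold Spec_determine_overall_quality; infer_instance

-- ===== CLAIM (what is proved, stated in full; the proofs are below) =====
def Claim_equal_determine_overall_quality : Prop := ∀ (phases : List (String × List (String × String))), Dom_determine_overall_quality phases → Pre_determine_overall_quality phases → Spec_determine_overall_quality phases (determine_overall_quality phases)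

-- ===== LEMMAS AND PROOFS =====

lemma pvRank_eq (s : String) :
    pvRank s = if s == "success" then 0 else if s == "partial" then 2
               else if s == "failed" then 3 else 1 := by
  simp only [pvRank, PySem.Dict.getD, PySem.Dict.get?_mk_cons]
  split_ifs with h1 h2 h3 <;> simp_all [PySem.Dict.get?]

lemma foldl_max_le_iff {α : Type} (g : α → Nat) (l : List α) (a m : Nat) :
    l.foldl (fun acc p => max acc (g p)) a ≤ m ↔ a ≤ m ∧ ∀ x ∈ l, g x ≤ m := by
  induction l generalizing a with
  | nil => simp
  | cons h t ih => simp only [List.foldl_cons, ih, Nat.max_le, List.mem_cons]; aesop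

lemma le_foldl_max {α : Type} (g : α → Nat) (l : List α) (a k : Nat) :
    k ≤ l.foldl (fun acc p => max acc (g p)) a ↔ k ≤ a ∨ ∃ x ∈ l, k ≤ g x := by
  induction l generalizing a with
  | nil => simp
  | cons h t ih => simp only [List.foldl_cons, ih, le_max_iff, List.mem_cons]; aesop

def pvSt (p : String × List (String × String)) : String :=
  PySem.Dict.getD (PySem.Dict.mk p.2) "status" ""

-- ===== VERDICT (by name: the statement is the Claim_ definition above) =====
theorem determine_overall_quality_spec : Claim_equal_determine_overall_quality := by
  intro phases _ _
  unfold Spec_determine_overall_quality determine_overall_quality determine_overall_quality_alt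
  show (if phases.all (fun p => pvSt p == "success") then "GOLD"
        else if phases.any (fun p => pvSt p == "failed") then "BRONZE"
        else if phases.any (fun p => pvSt p == "partial") then "SILVER"
        else "UNKNOWN")
      = ["GOLD", "UNKNOWN", "SILVER", "BRONZE"].getD
          (phases.foldl (fun worst p => max worst (pvRank (pvSt p))) 0) ""
  by_cases hall : phases.all (fun p => pvSt p == "success") = true
  · have hw0 : phases.foldl (fun worst p => max worst (pvRank (pvSt p))) 0 = 0 := by
      have h := (foldl_max_le_iff (fun p => pvRank (pvSt p)) phases 0 0).mpr
        ⟨le_refl 0, fun x hx => by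
          have hxs := List.all_eq_true.mp hall x hx
          simp only at hxs
          simp [pvRank_eq, hxs]⟩
      omega
    rw [hw0, if_pos hall]; rfl
  · by_cases hfail : phases.any (fun p => pvSt p == "failed") = true
    · have hw3 : phases.foldl (fun worst p => max worst (pvRank (pvSt p))) 0 = 3 := by
        obtain ⟨x, hx, hxf⟩ := List.any_eq_true.mp hfail
        have h3 : 3 ≤ phases.foldl (fun worst p => max worst (pvRank (pvSt p))) 0 :=
          (le_foldl_max (fun p => pvRank (pvSt p)) phases 0 3).mpr
            (Or.inr ⟨x, hx, by show 3 ≤ pvRank (pvSt x); rw [eq_of_beq hxf]; decide⟩)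
        have hle := (foldl_max_le_iff (fun p => pvRank (pvSt p)) phases 0 3).mpr
          ⟨by omega, fun y _ => by simp only [pvRank_eq]; split_ifs <;> omega⟩
        omega
      rw [hw3, if_neg hall, if_pos hfail]; rfl
    · by_cases hpart : phases.any (fun p => pvSt p == "partial") = true
      · have hw2 : phases.foldl (fun worst p => max worst (pvRank (pvSt p))) 0 = 2 := by
          obtain ⟨x, hx, hxp⟩ := List.any_eq_true.mp hpart
          have h2 : 2 ≤ phases.foldl (fun worst p => max worst (pvRank (pvSt p))) 0 :=
            (le_foldl_max (fun p => pvRank (pvSt p)) phases 0 2).mpr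
              (Or.inr ⟨x, hx, by show 2 ≤ pvRank (pvSt x); rw [eq_of_beq hxp]; decide⟩)
          have hle := (foldl_max_le_iff (fun p => pvRank (pvSt p)) phases 0 2).mpr
            ⟨by omega, fun y hy => by
              have hyf : ¬ (pvSt y == "failed") = true := fun h =>
                hfail (List.any_eq_true.mpr ⟨y, hy, h⟩)
              simp only [pvRank_eq]; split_ifs <;> simp_all⟩
          omega
        rw [hw2, if_neg hall, if_neg hfail, if_pos hpart]; rfl
      · have hw1 : phases.foldl (fun worst p => max worst (pvRank (pvSt p))) 0 = 1 := by
          have hex : ∃ x ∈ phases, ¬ (pvSt x == "success") = true := by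
            by_contra hc
            push Not at hc
            exact hall (List.all_eq_true.mpr fun x hx => hc x hx)
          obtain ⟨x, hx, hxs⟩ := hex
          have h1 : 1 ≤ phases.foldl (fun worst p => max worst (pvRank (pvSt p))) 0 :=
            (le_foldl_max (fun p => pvRank (pvSt p)) phases 0 1).mpr
              (Or.inr ⟨x, hx, by simp only [pvRank_eq]; split_ifs <;> simp_all⟩)
          have hle := (foldl_max_le_iff (fun p => pvRank (pvSt p)) phases 0 1).mpr
            ⟨by omega, fun y hy => by
              have hyf : ¬ (pvSt y == "failed") = true := fun h =>
                hfail (List.any_eq_true.mpr ⟨y, hy, h⟩)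
              have hyp : ¬ (pvSt y == "partial") = true := fun h =>
                hpart (List.any_eq_true.mpr ⟨y, hy, h⟩)
              simp only [pvRank_eq]; split_ifs <;> simp_all⟩
          omega
        rw [hw1, if_neg hall, if_neg hfail, if_neg hpart]; rfl
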